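-- pv_equiv track=rewrite | github.com/JakeSaunders1995/comp16321MarkingMid | CW_encrypt/decrypt_q94072jl/spellcheck_q94072jl.py | findErrors
-- ===== SOURCE A (Python) =====
-- def findErrors(dictionaryWords, textWords): #Checks for any incorrect and correct spelt words
--     misspelledWords = []
--     correctWords = [] #declares misspelledWords and correctWords as list
--     for word in textWords: #for each word in text file run loop
--         if word not in dictionaryWords:  #if current word does not exist in dictionaryWords (it means its misspelt) add to misspelledWords
--             misspelledWords.append(word)
--         else:   #Otherwise, word is correctly spelled, so add to correctWords
--             correctWords.append(word)
--
--
--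
--     NumberOfMisspelledWords = str(len(misspelledWords)) #get number of misspelled words (elements) in misspelledWords and convert to string
--
--     NumberOfCorrectWords = str(len(correctWords)) #get number of correctly words (elements) in correctWords and convert to string
--
--     NumberOfWords = str(len(textWords)) #get number of words (elements) in textWords and convert to string
--
--     return NumberOfMisspelledWords, NumberOfCorrectWords, NumberOfWords
-- ===== SOURCE B (Python) =====
-- def findErrors(dictionaryWords, textWords):
--     # Stage 1: frequency table of the text, one entry per DISTINCT word.
--     freq = {}
--     for w in textWords:
--         freq[w] = freq.get(w, 0) + 1
--     # Stage 2: membership is decided once per distinct word against a set.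
--     dset = set(dictionaryWords)
--     correct = 0
--     for w, c in freq.items():
--         if w in dset:
--             correct += c
--     total = len(textWords)
--     return str(total - correct), str(correct), str(total)
-- ===== Notes on version B (the rewrite author's own statement) =====
-- stated objective: faster
-- what changed: Instead of classifying every word with a linear dictionary scan into two lists, B builds a frequency table of the text (one entry per distinct word) and a hash set of the dictionary, then sums the counts of distinct words found in the set; misspelled is derived by subtraction from the total.
import Mathlib
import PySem

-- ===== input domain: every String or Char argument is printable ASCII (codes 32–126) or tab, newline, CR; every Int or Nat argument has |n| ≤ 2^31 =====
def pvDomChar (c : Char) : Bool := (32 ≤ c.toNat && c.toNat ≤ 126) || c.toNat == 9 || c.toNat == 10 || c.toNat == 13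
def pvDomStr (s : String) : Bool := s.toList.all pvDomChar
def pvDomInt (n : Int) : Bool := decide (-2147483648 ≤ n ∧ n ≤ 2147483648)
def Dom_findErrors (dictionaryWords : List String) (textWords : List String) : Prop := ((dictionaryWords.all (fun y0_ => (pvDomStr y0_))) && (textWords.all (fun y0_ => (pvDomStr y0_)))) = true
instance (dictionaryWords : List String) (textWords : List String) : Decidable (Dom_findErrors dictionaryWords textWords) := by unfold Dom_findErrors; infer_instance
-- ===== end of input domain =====

-- B replaces A's two classifying accumulator lists by a frequency table of the text plus a
-- dictionary set, summing the counts of the distinct correct words (objective: faster, measured).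

-- ===== PORT A =====
def findErrors (dictionaryWords : List String) (textWords : List String) : String × String × String :=
  let acc := textWords.foldl
    (fun (acc : List String × List String) word =>
      if !(dictionaryWords.contains word) then (acc.1 ++ [word], acc.2)
      else (acc.1, acc.2 ++ [word]))
    ([], [])
  let numberOfMisspelledWords := PySem.Int.toStr (acc.1.length : Int)
  let numberOfCorrectWords := PySem.Int.toStr (acc.2.length : Int)
  let numberOfWords := PySem.Int.toStr (textWords.length : Int)
  (numberOfMisspelledWords, numberOfCorrectWords, numberOfWords)

-- ===== PORT B =====
def findErrors_alt (dictionaryWords : List String) (textWords : List String) : String × String × String :=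
  -- freq[w] = freq.get(w, 0) + 1 over textWords
  let freq := textWords.foldl (fun (d : PySem.Dict String Int) w => d.insert w (d.getD w 0 + 1)) PySem.Dict.empty
  let dset : PySem.Set String := PySem.Set.ofList dictionaryWords
  -- for w, c in freq.items(): if w in dset: correct += c
  let correct : Int := freq.items.foldl (fun acc p => if dset.contains p.1 then acc + p.2 else acc) 0
  let total : Int := textWords.length
  (PySem.Int.toStr (total - correct), PySem.Int.toStr correct, PySem.Int.toStr total)

-- ===== PRECONDITION & SPEC =====
def Spec_findErrors (dictionaryWords : List String) (textWords : List String) (out : String × String × String) : Prop := out = findErrors_alt dictionaryWords textWords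
instance (dictionaryWords : List String) (textWords : List String) (out : String × String × String) : Decidable (Spec_findErrors dictionaryWords textWords out) := by unfold Spec_findErrors; infer_instance

-- ===== CLAIM (what is proved, stated in full; the proofs are below) =====
def Claim_equal_findErrors : Prop := ∀ (dictionaryWords : List String) (textWords : List String), Dom_findErrors dictionaryWords textWords → Spec_findErrors dictionaryWords textWords (findErrors dictionaryWords textWords)

-- ===== LEMMAS AND PROOFS =====

-- A's two-accumulator loop appends exactly the filtered sublists.
theorem findErrors_fold_lengths (dict : List String) (text : List String)
    (a b : List String) :
    (text.foldl
      (fun (acc : List String × List String) word =>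
        if !(dict.contains word) then (acc.1 ++ [word], acc.2)
        else (acc.1, acc.2 ++ [word]))
      (a, b)) =
    (a ++ text.filter (fun w => !(dict.contains w)),
     b ++ text.filter (fun w => dict.contains w)) := by
  induction text generalizing a b with
  | nil => simp
  | cons x xs ih =>
    simp only [List.foldl_cons, List.filter_cons]
    cases h : dict.contains x <;>
      simp only [Bool.not_false, Bool.not_true, Bool.false_eq_true, reduceIte, if_true,
        ih, List.append_assoc, List.singleton_append]

-- A conditional-accumulation foldl is init plus the sum of the guarded values.
theorem foldl_if_add (P : String → Bool) (l : List (String × Int)) (init : Int) :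
    l.foldl (fun acc p => if P p.1 then acc + p.2 else acc) init =
    init + (l.map (fun p => if P p.1 then p.2 else 0)).sum := by
  induction l generalizing init with
  | nil => simp
  | cons x xs ih =>
    simp only [List.foldl_cons, List.map_cons, List.sum_cons, ih]
    cases h : P x.1 <;> simp <;> ring

-- On a Nodup list containing x, the indicator of x sums to the guard at x.
theorem sum_indicator_nodup (P : String → Bool) (l : List String) (x : String)
    (hnd : l.Nodup) (hx : x ∈ l) :
    (l.map (fun k => if P k then (if x == k then (1 : Int) else 0) else 0)).sum =
    (if P x then (1 : Int) else 0) := by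
  induction l with
  | nil => cases hx
  | cons y ys ih =>
    obtain ⟨hy, hnd'⟩ := List.nodup_cons.mp hnd
    simp only [List.map_cons, List.sum_cons]
    rcases List.mem_cons.mp hx with rfl | h
    · have hz : (ys.map (fun k => if P k then (if x == k then (1 : Int) else 0) else 0)).sum = 0 := by
        apply List.sum_eq_zero
        intro v hv
        rcases List.mem_map.mp hv with ⟨k, hk, rfl⟩
        have hxk : x ≠ k := fun e => hy (e ▸ hk)
        cases hP : P k <;> simp [hxk]
      simp only [beq_iff_eq] at hz
      simp [hz]
    · have hxy : x ≠ y := fun e => hy (e ▸ h)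
      rw [ih hnd' h]
      simp [hxy]

-- Summing counts of the distinct words that satisfy P gives countP over the whole text.
theorem sum_counts_eq_countP (P : String → Bool) (l : List String) (text : List String)
    (hnd : l.Nodup) (hcov : ∀ w ∈ text, w ∈ l) :
    (l.map (fun k => if P k then (text.count k : Int) else 0)).sum =
    (text.countP P : Int) := by
  induction text with
  | nil =>
    simp only [List.count_nil, List.countP_nil, Nat.cast_zero, Nat.cast_ofNat]
    rw [List.sum_eq_zero]
    intro v hv
    rcases List.mem_map.mp hv with ⟨k, _, rfl⟩
    cases P k <;> simp
  | cons x xs ih =>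
    have hx : x ∈ l := hcov x (List.mem_cons_self ..)
    have hxs : ∀ w ∈ xs, w ∈ l := fun w hw => hcov w (List.mem_cons_of_mem _ hw)
    have hsplit : ∀ k : String, (((x :: xs).count k : Int)) =
        (xs.count k : Int) + (if x == k then 1 else 0) := by
      intro k
      by_cases h : x = k
      · subst h; simp [List.count_cons]
      · have h' : (k == x) = false := by
          simp only [beq_eq_false_iff_ne]; exact fun e => h e.symm
        have h'' : (x == k) = false := by simp [h]
        simp [List.count_cons, h', h'']
    calc (l.map (fun k => if P k then ((x :: xs).count k : Int) else 0)).sum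
        = (l.map (fun k => (if P k then (xs.count k : Int) else 0)
            + (if P k then (if x == k then (1 : Int) else 0) else 0))).sum := by
          apply congrArg
          apply List.map_congr_left
          intro k _
          cases hP : P k
          · simp [hP]
          · simp [hP, hsplit k]
      _ = (l.map (fun k => if P k then (xs.count k : Int) else 0)).sum
            + (l.map (fun k => if P k then (if x == k then (1 : Int) else 0) else 0)).sum := by
          rw [← List.sum_map_add]
      _ = (xs.countP P : Int) + (if P x then 1 else 0) := by
          rw [ih hxs, sum_indicator_nodup P l x hnd hx]
      _ = ((x :: xs).countP P : Int) := by
          rw [List.countP_cons]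
          cases hP : P x <;> simp [hP]

-- B's correct-count equals the countP of dictionary membership over the text.
theorem correct_eq_countP (dict : List String) (text : List String) :
    ((PySem.Dict.counter text).items.foldl
      (fun acc p => if (PySem.Set.ofList dict).contains p.1 then acc + p.2 else acc) (0 : Int)) =
    (text.countP (fun w => dict.contains w) : Int) := by
  rw [foldl_if_add, PySem.Dict.items_counter]
  have hmem : ∀ k : String, (PySem.Set.ofList dict).contains k = dict.contains k := by
    intro k
    simp [List.contains_eq_mem, PySem.Set.mem_ofList]
  rw [List.map_map]
  have hcomp : ((PySem.Set.ofList text).map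
      ((fun p : String × Int => if (PySem.Set.ofList dict).contains p.1 then p.2 else 0)
        ∘ fun k => (k, (text.count k : Int)))) =
      (PySem.Set.ofList text).map (fun k => if dict.contains k then (text.count k : Int) else 0) := by
    apply List.map_congr_left
    intro k _
    simp only [Function.comp, hmem k]
  rw [hcomp, sum_counts_eq_countP (fun w => dict.contains w) (PySem.Set.ofList text) text
    (PySem.Set.nodup_ofList text) (fun w hw => (PySem.Set.mem_ofList text w).mpr hw)]
  simp

-- ===== VERDICT (by name: the statement is the Claim_ definition above) =====
theorem findErrors_spec : Claim_equal_findErrors := by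
  intro dict text _
  show _ = _
  simp only [findErrors, findErrors_alt, findErrors_fold_lengths dict text [] [],
    PySem.Dict.foldl_insert_getD_add_one_eq_counter, correct_eq_countP]
  simp only [List.nil_append, ← List.countP_eq_length_filter]
  have hlen := List.length_eq_countP_add_countP (fun w => !(dict.contains w)) (l := text)
  have h2 : (List.countP (fun a => decide ¬((!dict.contains a) = true)) text)
      = List.countP (fun w => dict.contains w) text := by
    apply List.countP_congr; intro a _; cases dict.contains a <;> simp
  rw [h2] at hlen
  refine Prod.ext ?_ (Prod.ext rfl rfl)
  show PySem.Int.toStr _ = PySem.Int.toStr _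
  congr 1
  omega
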